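-- pv_equiv track=rewrite | github.com/ecarreras/adventofcode22 | day1/calories.py | max_calories
-- ===== SOURCE A (Python) =====
-- def max_calories(calories, top=1):
--     from collections import Counter
--     calories_per_elf = Counter()
--     elf = 1
--     for cal in calories.split('\n'):
--         if not cal:
--             elf += 1
--             continue
--         calories_per_elf[elf] += int(cal)
--     return sum(x[1] for x in calories_per_elf.most_common()[0:top])
-- ===== SOURCE B (Python) =====
-- def max_calories(calories, top=1):
--     def totals(lines):
--         if not lines:
--             return []
--         i = 0
--         while i < len(lines) and lines[i]:
--             i += 1
--         group = lines[:i]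
--         rest = totals(lines[i + 1:])
--         return ([sum(int(x) for x in group)] if group else []) + rest
--     ts = totals(calories.split('\n'))
--     return sum(sorted(ts, reverse=True)[0:top])
-- ===== Notes on version B (the rewrite author's own statement) =====
-- stated objective: simpler
-- what changed: Replaces the flat loop over lines with an elf-numbered Counter and most_common() by a recursive group decomposition of the line list into a plain list of per-elf totals, selecting the top-k total via a reverse-sorted slice.
import Mathlib
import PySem

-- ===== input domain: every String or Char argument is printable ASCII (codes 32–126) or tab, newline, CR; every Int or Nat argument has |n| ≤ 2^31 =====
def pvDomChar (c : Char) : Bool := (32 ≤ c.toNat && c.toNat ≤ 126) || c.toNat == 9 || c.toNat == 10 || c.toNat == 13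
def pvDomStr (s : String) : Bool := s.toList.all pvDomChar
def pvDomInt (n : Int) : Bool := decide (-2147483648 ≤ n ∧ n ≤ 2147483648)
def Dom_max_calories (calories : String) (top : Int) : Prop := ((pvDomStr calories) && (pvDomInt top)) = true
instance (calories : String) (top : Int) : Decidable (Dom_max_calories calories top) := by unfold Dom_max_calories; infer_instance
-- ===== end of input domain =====

-- B replaces A's flat loop + elf-keyed Counter + most_common() by a recursive group
-- decomposition of the line list into a plain list of totals and a reverse-sorted slice
-- (objective: simpler).

-- ===== PORT A =====
-- int(s); under Pre_ every parsed line is an int literal, so the default is never used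
def pvParse (s : String) : Int := (PySem.Int.ofStr? s).getD 0

-- A's loop body: state (calories_per_elf, elf)
def pvStepA (st : PySem.Dict Int Int × Int) (cal : String) : PySem.Dict Int Int × Int :=
  if cal == "" then (st.1, st.2 + 1)
  else (st.1.modify st.2 0 (· + pvParse cal), st.2)

def max_calories (calories : String) (top : Int) : Int :=
  let lines := (PySem.Str.split? calories "\n").getD []
  let st := lines.foldl pvStepA (PySem.Dict.empty, 1)
  -- most_common() = sorted(items, key=itemgetter(1), reverse=True)
  let mc := PySem.List.sorted st.1.items (fun p => p.2) true
  ((PySem.List.slice mc (some 0) (some top)).map (·.2)).sum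

-- ===== PORT B =====
-- totals(lines): strip the leading group of nonempty lines, recurse past the separator
def pvTotals (lines : List String) : List Int :=
  match lines with
  | [] => []
  | a :: t =>
    let group := (a :: t).takeWhile (fun l => !(l == ""))
    let rest := pvTotals (((a :: t).dropWhile (fun l => !(l == ""))).drop 1)
    (if group.isEmpty then [] else [(group.map pvParse).sum]) ++ rest
termination_by lines.length
decreasing_by
  have h := List.length_dropWhile_le (fun l : String => !(l == "")) (a :: t)
  simp only [List.length_drop, List.length_cons] at h ⊢
  omega

def max_calories_alt (calories : String) (top : Int) : Int :=
  let ts := pvTotals ((PySem.Str.split? calories "\n").getD [])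
  (PySem.List.slice (PySem.List.sorted ts (fun x => x) true) (some 0) (some top)).sum

-- ===== PRECONDITION & SPEC =====
-- Pre_ excludes exactly the inputs where A raises ValueError: a nonempty line that is
-- not a Python int literal (both A and B call int() on every nonempty line).
def Pre_max_calories (calories : String) (top : Int) : Prop :=
  ∀ l ∈ (PySem.Str.split? calories "\n").getD [], l ≠ "" → (PySem.Int.ofStr? l).isSome
instance (calories : String) (top : Int) : Decidable (Pre_max_calories calories top) := by
  unfold Pre_max_calories; infer_instance

def pvWitness_max_calories : String × Int := ("100\n200\n\n300", 2)

def Spec_max_calories (calories : String) (top : Int) (out : Int) : Prop :=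
  out = max_calories_alt calories top
instance (calories : String) (top : Int) (out : Int) : Decidable (Spec_max_calories calories top out) := by
  unfold Spec_max_calories; infer_instance

-- ===== CLAIM (what is proved, stated in full; the proofs are below) =====
def Claim_equal_max_calories : Prop := ∀ (calories : String) (top : Int),
  Dom_max_calories calories top → Pre_max_calories calories top →
  Spec_max_calories calories top (max_calories calories top)

-- ===== LEMMAS AND PROOFS =====

-- a run of nonempty lines only modifies the current elf's entry
theorem pvFoldA_group (g : List String) (d : PySem.Dict Int Int) (e : Int)
    (hg : ∀ l ∈ g, (l == "") = false) :
    g.foldl pvStepA (d, e) =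
      (g.foldl (fun d cal => d.modify e 0 (· + pvParse cal)) d, e) := by
  induction g generalizing d with
  | nil => rfl
  | cons a t ih =>
    have ha := hg a (by simp)
    simp only [List.foldl_cons, pvStepA, ha, Bool.false_eq_true, if_false]
    exact ih _ (fun l hl => hg l (by simp [hl]))

theorem pvModFold_getD (g : List String) (d : PySem.Dict Int Int) (e : Int) :
    (g.foldl (fun d cal => d.modify e 0 (· + pvParse cal)) d).getD e 0 =
      d.getD e 0 + (g.map pvParse).sum := by
  induction g generalizing d with
  | nil => simp
  | cons a t ih =>
    simp only [List.foldl_cons, List.map_cons, List.sum_cons, ih,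
      PySem.Dict.getD_modify_self]
    ring

theorem pvModFold_items (g : List String) (d : PySem.Dict Int Int) (e : Int)
    (hfresh : d.contains e = false) (hne : g ≠ []) :
    (g.foldl (fun d cal => d.modify e 0 (· + pvParse cal)) d).items =
      d.items ++ [(e, (g.map pvParse).sum)] := by
  have hnotmem : e ∉ d.keys := by
    intro hmem
    rw [(PySem.Dict.contains_iff_mem_keys d e).mpr hmem] at hfresh
    simp at hfresh
  induction g using List.reverseRecOn with
  | nil => exact absurd rfl hne
  | append_singleton t a ih =>
    rw [List.foldl_append]
    by_cases ht : t = []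
    · subst ht
      simp only [List.foldl_nil, List.foldl_cons]
      rw [show d.modify e 0 (· + pvParse a) = d.insert e (d.getD e 0 + pvParse a) from rfl,
        PySem.Dict.getD_of_not_contains d 0 hfresh,
        PySem.Dict.items_insert_of_not_contains d _ hfresh]
      simp
    · have hitems := ih ht
      have hgetD : (t.foldl (fun d cal => d.modify e 0 (· + pvParse cal)) d).getD e 0 =
          (t.map pvParse).sum := by
        rw [pvModFold_getD, PySem.Dict.getD_of_not_contains d 0 hfresh]; ring
      have hcont : (t.foldl (fun d cal => d.modify e 0 (· + pvParse cal)) d).contains e = true := by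
        rw [PySem.Dict.contains_iff_mem_keys]
        have : (e, (t.map pvParse).sum) ∈
            (t.foldl (fun d cal => d.modify e 0 (· + pvParse cal)) d).items := by
          rw [hitems]; simp
        exact PySem.Dict.mem_keys_of_mem_items _ this
      set F := t.foldl (fun d cal => d.modify e 0 (· + pvParse cal)) d with hF
      simp only [List.foldl_cons, List.foldl_nil]
      rw [show F.modify e 0 (· + pvParse a) = F.insert e (F.getD e 0 + pvParse a) from rfl,
        hgetD, PySem.Dict.items_insert_of_contains _ _ hcont, hitems]
      rw [List.map_append]
      have hleft : (d.items.map
          (fun p => if (p.1 == e) = true then (e, (t.map pvParse).sum + pvParse a) else p)) =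
          d.items := by
        refine (List.map_congr_left ?_).trans (List.map_id _)
        intro p hp
        have : p.1 ≠ e := fun h =>
          hnotmem (h ▸ PySem.Dict.mem_keys_of_mem_items d hp)
        simp [this]
      rw [hleft]
      simp

-- head of dropWhile fails the predicate
theorem pvDropWhileHead {α : Type} (p : α → Bool) (l : List α) (b : α) (r' : List α)
    (h : l.dropWhile p = b :: r') : p b = false := by
  induction l with
  | nil => simp at h
  | cons x xs ih =>
    rw [List.dropWhile_cons] at h
    split at h
    · exact ih h
    · next hpx => cases h; simpa using hpx

-- main invariant: the values of A's counter, in order, are B's totals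
theorem pvMain (n : Nat) (lines : List String) (d : PySem.Dict Int Int) (e : Int)
    (hn : lines.length ≤ n) (hk : ∀ k ∈ d.keys, k < e) :
    ((lines.foldl pvStepA (d, e)).1).items.map (·.2) =
      d.items.map (·.2) ++ pvTotals lines := by
  induction n generalizing lines d e with
  | zero =>
    have : lines = [] := List.eq_nil_of_length_eq_zero (Nat.le_zero.mp hn)
    subst this; simp [pvTotals]
  | succ n ih =>
    match lines with
    | [] => simp [pvTotals]
    | a :: t =>
      by_cases ha : a = ""
      · subst ha
        have hstep : (("" :: t).foldl pvStepA (d, e)) = t.foldl pvStepA (d, e + 1) := by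
          simp [pvStepA]
        rw [hstep, pvTotals]
        simp only [List.takeWhile_cons, List.dropWhile_cons]
        simp only [BEq.rfl, Bool.not_true, Bool.false_eq_true, if_false,
          List.isEmpty_nil, if_true, List.drop_one, List.tail_cons, List.nil_append]
        exact ih t d (e + 1) (by simpa using hn)
          (fun k hk' => lt_trans (hk k hk') (by omega))
      · have hpa : ((a == "") : Bool) = false := by simpa using ha
        have hfresh : d.contains e = false := by
          rw [PySem.Dict.contains_eq_decide_mem_keys]
          simp only [decide_eq_false_iff_not]
          intro hmem; exact absurd (hk e hmem) (lt_irrefl e)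
        set p : String → Bool := fun l => !(l == "") with hp
        have hsplit : (a :: t).takeWhile p ++ (a :: t).dropWhile p = a :: t :=
          List.takeWhile_append_dropWhile
        have hgne : (a :: t).takeWhile p ≠ [] := by
          simp [hp, hpa]
        have hgall : ∀ l ∈ (a :: t).takeWhile p, (l == "") = false := by
          intro l hl
          have := List.mem_takeWhile_imp hl
          simpa [hp] using this
        -- fold over the group
        conv_lhs => rw [← hsplit, List.foldl_append]
        rw [pvFoldA_group _ d e hgall]
        set D := ((a :: t).takeWhile p).foldl (fun d cal => d.modify e 0 (· + pvParse cal)) d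
          with hD
        have hDitems : D.items =
            d.items ++ [(e, (((a :: t).takeWhile p).map pvParse).sum)] :=
          pvModFold_items _ d e hfresh hgne
        have hDkeys : ∀ k ∈ D.keys, k < e + 1 := by
          intro k hkmem
          have : k ∈ D.items.map (·.1) := hkmem
          rw [hDitems] at this
          simp only [List.map_append, List.mem_append] at this
          rcases this with h1 | h2
          · exact lt_trans (hk k h1) (by omega)
          · simp at h2; omega
        rw [pvTotals]
        simp only [← hp]
        rw [if_neg (by simpa [List.isEmpty_iff] using hgne)]
        cases hr : (a :: t).dropWhile p with
        | nil =>
          simp [hDitems, pvTotals]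
        | cons b r' =>
          have hb : b = "" := by
            have := pvDropWhileHead p (a :: t) b r' hr
            simpa [hp] using this
          have hstep2 : ((b :: r').foldl pvStepA (D, e)) = r'.foldl pvStepA (D, e + 1) := by
            simp [pvStepA, hb]
          rw [hstep2]
          have hlen : r'.length ≤ n := by
            have h1 := List.length_dropWhile_le p (a :: t)
            rw [hr] at h1
            simp only [List.length_cons] at h1 hn
            omega
          rw [ih r' D (e + 1) hlen hDkeys, hDitems]
          simp

theorem pvSortedMap (items : List (Int × Int)) (ts : List Int)
    (h : items.map (·.2) = ts) :
    (PySem.List.sorted items (fun p => p.2) true).map (·.2) =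
      PySem.List.sorted ts (fun x => x) true := by
  apply List.Perm.eq_of_pairwise (le := fun a b : Int => b ≤ a)
  · intro a b _ _ h1 h2; omega
  · exact List.pairwise_map.mpr (PySem.List.sorted_pairwise_rev items (fun p => p.2))
  · exact PySem.List.sorted_pairwise_rev ts (fun x => x)
  · have p1 : ((PySem.List.sorted items (fun p => p.2) true).map (·.2)).Perm ts :=
      h ▸ (PySem.List.sorted_perm items (fun p => p.2) true).map (·.2)
    exact p1.trans (PySem.List.sorted_perm ts (fun x => x) true).symm

theorem pvSliceMap {α β : Type} (f : α → β) (xs : List α) (a b : Option Int) :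
    (PySem.List.slice xs a b).map f = PySem.List.slice (xs.map f) a b := by
  cases a <;> cases b <;>
    simp [PySem.List.slice, List.map_take, List.map_drop]

-- ===== VERDICT (by name: the statement is the Claim_ definition above) =====
theorem max_calories_spec : Claim_equal_max_calories := by
  intro calories _ _ _
  unfold Spec_max_calories max_calories max_calories_alt
  have hmain := pvMain ((PySem.Str.split? calories "\n").getD []).length
    ((PySem.Str.split? calories "\n").getD []) PySem.Dict.empty 1 le_rfl
    (by intro k hk; rw [PySem.Dict.keys_empty] at hk; exact absurd hk (List.not_mem_nil))
  simp only [show (PySem.Dict.empty : PySem.Dict Int Int).items = [] from rfl,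
    List.map_nil, List.nil_append] at hmain
  simp only []
  rw [pvSliceMap, pvSortedMap _ _ hmain]
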